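-- pv_equiv track=rewrite | github.com/Nikiktoss/Algorithm_and_Data_Structures | telephone/main.py | count_number_of_clicks
-- ===== SOURCE A (Python) =====
-- def count_number_of_clicks(array_of_letters, buttons):
--     if buttons == 1:
--         result = 0
--         for i in range(len(array_of_letters)):
--             result += (array_of_letters[i] * (i + 1))
--         return result
--     elif buttons > len(array_of_letters):
--         return sum(array_of_letters)
--     else:
--         matrix = [[0] * len(array_of_letters) for _ in range(buttons)]
--         max_num_of_letters = len(array_of_letters) - buttons + 1
--         for i in range(len(matrix)):
--             num_of_clicks = 2
--             for j in range(i, i + max_num_of_letters):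
--                 if j == 0:
--                     matrix[i][j] = array_of_letters[0]
--                 elif i == j:
--                     matrix[i][j] = matrix[i - 1][j - 1] + array_of_letters[i]
--                 else:
--                     matrix[i][j] = matrix[i][j - 1] + num_of_clicks * array_of_letters[j]
--                     num_of_clicks += 1
--
--             if i != 0:
--                 for j in range(i + 1,  i + max_num_of_letters):
--                     num_of_clicks2 = 1
--                     number = matrix[i - 1][j - 1]
--                     for k in range(j, i + max_num_of_letters):
--                         number += (num_of_clicks2 * array_of_letters[k])
--                         num_of_clicks2 += 1
--
--                         if number < matrix[i][k]:
--                             matrix[i][k] = number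
--
--         return matrix[-1][-1]
-- ===== SOURCE B (Python) =====
-- def count_number_of_clicks(array_of_letters, buttons):
--     a = array_of_letters
--     n = len(a)
--     if buttons == 1:
--         return sum(v * (t + 1) for t, v in enumerate(a))
--     if buttons > n:
--         return sum(a)
--     # prefix sums: P[i] = a[0]+..+a[i-1], Q[i] = 1*a[0]+2*a[1]+..+i*a[i-1]
--     P = [0]
--     Q = [0]
--     for t, v in enumerate(a):
--         P.append(P[-1] + v)
--         Q.append(Q[-1] + v * (t + 1))
--
--     def seg(j, k):  # cost of letters j..k placed as one button group
--         return (Q[k + 1] - Q[j]) - j * (P[k + 1] - P[j])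
--
--     dp = [seg(0, k) for k in range(n)]  # one button for letters 0..k
--     for i in range(1, buttons):
--         # row i: i+1 buttons, each group nonempty; entries with k < i are unused
--         dp = [min(dp[j - 1] + seg(j, k) for j in range(i, k + 1)) if k >= i else 0
--               for k in range(n)]
--     return dp[n - 1]
-- ===== Notes on version B (the rewrite author's own statement) =====
-- stated objective: alternative
-- what changed: Replaces A's mutable (buttons x n) matrix with triangular in-place min-updates and running incremental segment costs by a rolling 1-D DP row computed from O(1) prefix-sum segment costs (P/Q prefix arrays) and an explicit min over split points.
import Mathlib
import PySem

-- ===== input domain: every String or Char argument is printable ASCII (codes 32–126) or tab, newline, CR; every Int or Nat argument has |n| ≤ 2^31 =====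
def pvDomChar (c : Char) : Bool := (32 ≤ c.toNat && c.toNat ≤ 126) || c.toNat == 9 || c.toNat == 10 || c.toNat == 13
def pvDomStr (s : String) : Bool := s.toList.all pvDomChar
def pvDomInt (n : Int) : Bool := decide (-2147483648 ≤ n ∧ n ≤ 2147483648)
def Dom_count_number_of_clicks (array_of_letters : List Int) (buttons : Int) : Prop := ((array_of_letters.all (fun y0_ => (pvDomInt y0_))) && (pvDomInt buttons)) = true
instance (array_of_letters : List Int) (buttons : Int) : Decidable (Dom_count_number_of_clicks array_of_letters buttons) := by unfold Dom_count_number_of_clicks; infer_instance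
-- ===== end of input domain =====

-- B replaces A's mutable matrix with triangular in-place min-updates by a rolling 1-D DP row
-- over prefix-sum segment costs (alternative decomposition, same asymptotic cost).

-- ===== PORT A =====
-- matrix[i][j] read; exact for the indices A uses (all nonnegative in range under Pre_, plus the final [-1][-1])
def pvMget (m : List (List Int)) (i j : Int) : Int :=
  PySem.List.pyGetD (PySem.List.pyGetD m i ([] : List Int)) j 0

-- matrix[i][j] = v; A only assigns at nonnegative in-range indices, where this is exact
def pvMset (m : List (List Int)) (i j : Int) (v : Int) : List (List Int) :=
  m.set i.toNat ((m.getD i.toNat []).set j.toNat v)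

-- body of A's first inner loop 'for j in range(i, i + max_num_of_letters)'; state = (matrix, num_of_clicks)
def pvLoop1Body (a : List Int) (i : Int) (st : List (List Int) × Int) (j : Int) :
    List (List Int) × Int :=
  if j == 0 then
    (pvMset st.1 i j (PySem.List.pyGetD a 0 0), st.2)
  else if i == j then
    (pvMset st.1 i j (pvMget st.1 (i - 1) (j - 1) + PySem.List.pyGetD a i 0), st.2)
  else
    (pvMset st.1 i j (pvMget st.1 i (j - 1) + st.2 * PySem.List.pyGetD a j 0), st.2 + 1)

-- body of A's innermost loop 'for k in range(j, i + max_num_of_letters)'; state = (matrix, num_of_clicks2, number)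
def pvLoop3Body (a : List Int) (i : Int) (st2 : List (List Int) × Int × Int) (k : Int) :
    List (List Int) × Int × Int :=
  let number := st2.2.2 + st2.2.1 * PySem.List.pyGetD a k 0
  let noc2 := st2.2.1 + 1
  if number < pvMget st2.1 i k then (pvMset st2.1 i k number, noc2, number)
  else (st2.1, noc2, number)

-- body of A's loop 'for j in range(i + 1, i + max_num_of_letters)'
def pvLoop2Body (a : List Int) (i maxL : Int) (m2 : List (List Int)) (j : Int) :
    List (List Int) :=
  ((PySem.List.pyRange j (i + maxL) 1).foldl (pvLoop3Body a i)
    (m2, 1, pvMget m2 (i - 1) (j - 1))).1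

-- body of A's outer loop 'for i in range(len(matrix))'
def pvRowBody (a : List Int) (maxL : Int) (m : List (List Int)) (i : Int) :
    List (List Int) :=
  let st := (PySem.List.pyRange i (i + maxL) 1).foldl (pvLoop1Body a i) (m, 2)
  let m1 := st.1
  if i != 0 then
    (PySem.List.pyRange (i + 1) (i + maxL) 1).foldl (pvLoop2Body a i maxL) m1
  else m1

def count_number_of_clicks (array_of_letters : List Int) (buttons : Int) : Int :=
  if buttons == 1 then
    (PySem.List.pyRange 0 array_of_letters.length 1).foldl
      (fun result i => result + PySem.List.pyGetD array_of_letters i 0 * (i + 1)) 0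
  else if buttons > (array_of_letters.length : Int) then
    array_of_letters.sum
  else
    let a := array_of_letters
    let maxL : Int := (a.length : Int) - buttons + 1
    let matrix0 : List (List Int) :=
      (PySem.List.pyRange 0 buttons 1).map (fun _ => List.replicate a.length 0)
    let matrix :=
      (PySem.List.pyRange 0 (matrix0.length : Int) 1).foldl (pvRowBody a maxL) matrix0
    pvMget matrix (-1) (-1)

-- ===== PORT B =====
-- one step of B's row loop 'for i in range(1, buttons)'; seg is B's prefix-sum segment cost
def pvAltRow (a : List Int) (seg : Int → Int → Int) (dp : List Int) (i : Int) : List Int :=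
  (PySem.List.pyRange 0 a.length 1).map (fun k =>
    if i ≤ k then
      (PySem.List.min?
        ((PySem.List.pyRange i (k + 1) 1).map
          (fun j => PySem.List.pyGetD dp (j - 1) 0 + seg j k)) (fun x => x)).getD 0
    else 0)

def count_number_of_clicks_alt (array_of_letters : List Int) (buttons : Int) : Int :=
  if buttons == 1 then
    ((PySem.List.enumerate array_of_letters 0).map (fun tv => tv.2 * (tv.1 + 1))).sum
  else if buttons > (array_of_letters.length : Int) then
    array_of_letters.sum
  else
    let a := array_of_letters
    let PQ := (PySem.List.enumerate a 0).foldl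
      (fun (pq : List Int × List Int) tv =>
        (pq.1 ++ [PySem.List.pyGetD pq.1 (-1) 0 + tv.2],
         pq.2 ++ [PySem.List.pyGetD pq.2 (-1) 0 + tv.2 * (tv.1 + 1)]))
      ([0], [0])
    let seg : Int → Int → Int := fun j k =>
      (PySem.List.pyGetD PQ.2 (k + 1) 0 - PySem.List.pyGetD PQ.2 j 0)
        - j * (PySem.List.pyGetD PQ.1 (k + 1) 0 - PySem.List.pyGetD PQ.1 j 0)
    let dp0 := (PySem.List.pyRange 0 a.length 1).map (fun k => seg 0 k)
    let dp := (PySem.List.pyRange 1 buttons 1).foldl (pvAltRow a seg) dp0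
    PySem.List.pyGetD dp ((a.length : Int) - 1) 0

-- ===== PRECONDITION & SPEC =====
-- Pre_ excludes buttons ≤ 0, where A raises IndexError (matrix is empty, so matrix[-1] fails)
def Pre_count_number_of_clicks (array_of_letters : List Int) (buttons : Int) : Prop :=
  1 ≤ buttons
instance (array_of_letters : List Int) (buttons : Int) : Decidable (Pre_count_number_of_clicks array_of_letters buttons) := by unfold Pre_count_number_of_clicks; infer_instance

def pvWitness_count_number_of_clicks : List Int × Int := ([3, 1, 2], 2)

def Spec_count_number_of_clicks (array_of_letters : List Int) (buttons : Int) (out : Int) : Prop := out = count_number_of_clicks_alt array_of_letters buttons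
instance (array_of_letters : List Int) (buttons : Int) (out : Int) : Decidable (Spec_count_number_of_clicks array_of_letters buttons out) := by unfold Spec_count_number_of_clicks; infer_instance

-- ===== CLAIM (what is proved, stated in full; the proofs are below) =====
def Claim_equal_count_number_of_clicks : Prop := ∀ (array_of_letters : List Int) (buttons : Int), Dom_count_number_of_clicks array_of_letters buttons → Pre_count_number_of_clicks array_of_letters buttons → Spec_count_number_of_clicks array_of_letters buttons (count_number_of_clicks array_of_letters buttons)

-- ===== LEMMAS AND PROOFS =====

-- ---- mathematical skeleton: prefix sums, segment cost, the DP table ----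

def pvPp (a : List Int) (i : Nat) : Int := ((List.range i).map (fun t => a.getD t 0)).sum
def pvQq (a : List Int) (i : Nat) : Int := ((List.range i).map (fun t => a.getD t 0 * ((t : Int) + 1))).sum
def pvSeg (a : List Int) (j k : Nat) : Int :=
  ((List.range (k + 1 - j)).map (fun t => a.getD (j + t) 0 * ((t : Int) + 1))).sum
def pvMinL : List Int → Int
  | [] => 0
  | c :: r => r.foldl min c
def pvDrow (a : List Int) : Nat → Nat → Int
  | 0, k => pvSeg a 0 k
  | (i + 1), k => pvMinL ((List.range (k - i)).map (fun t => pvDrow a i (i + t) + pvSeg a (i + 1 + t) k))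
def pvCand (a : List Int) (i j k : Nat) : Int := pvDrow a (i - 1) (j - 1) + pvSeg a j k
def pvMC (a : List Int) (i k u : Nat) : Int :=
  pvMinL ((List.range (u + 1 - i)).map (fun t => pvCand a i (i + t) k))

theorem pvPp_succ (a : List Int) (i : Nat) : pvPp a (i + 1) = pvPp a i + a.getD i 0 := by
  simp [pvPp, List.range_succ]

theorem pvQq_succ (a : List Int) (i : Nat) :
    pvQq a (i + 1) = pvQq a i + a.getD i 0 * ((i : Int) + 1) := by
  simp [pvQq, List.range_succ]

theorem pvSeg_self (a : List Int) (j : Nat) : pvSeg a j j = a.getD j 0 := by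
  have h : j + 1 - j = 1 := by omega
  simp [pvSeg, h]

theorem pvSeg_nil (a : List Int) (j k : Nat) (h : k + 1 ≤ j) : pvSeg a j k = 0 := by
  have h0 : k + 1 - j = 0 := by omega
  simp [pvSeg, h0]

theorem pvSeg_succ (a : List Int) (j k : Nat) (h : j ≤ k + 1) :
    pvSeg a j (k + 1) = pvSeg a j k + (((k + 1 - j : Nat) : Int) + 1) * a.getD (k + 1) 0 := by
  have h1 : k + 1 + 1 - j = (k + 1 - j) + 1 := by omega
  have h2 : j + (k + 1 - j) = k + 1 := by omega
  rw [pvSeg, h1, List.range_succ]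
  simp [pvSeg, h2]
  ring

theorem pvSeg_eq_PQ (a : List Int) (j k : Nat) (hj : j ≤ k + 1) :
    pvSeg a j k = (pvQq a (k + 1) - pvQq a j) - (j : Int) * (pvPp a (k + 1) - pvPp a j) := by
  induction k with
  | zero =>
    interval_cases j
    · simp [pvSeg_self, pvQq, pvPp, List.range_one]
    · rw [pvSeg_nil a 1 0 (by omega)]; ring
  | succ k ih =>
    by_cases hj2 : j ≤ k + 1
    · rw [pvSeg_succ a j k hj2, ih hj2, pvQq_succ a (k + 1), pvPp_succ a (k + 1)]
      have hc : ((k + 1 - j : Nat) : Int) = (k : Int) + 1 - j := by omega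
      rw [hc]; push_cast; ring
    · have hj3 : j = k + 2 := by omega
      subst hj3
      rw [pvSeg_nil a (k + 2) (k + 1) (by omega)]
      ring

theorem pvMinL_append (l : List Int) (x : Int) :
    pvMinL (l ++ [x]) = if l = [] then x else min (pvMinL l) x := by
  cases l with
  | nil => simp [pvMinL]
  | cons c r => simp [pvMinL, List.foldl_append]

theorem pvMC_base (a : List Int) (i k : Nat) : pvMC a i k i = pvCand a i i k := by
  have h : i + 1 - i = 1 := by omega
  simp [pvMC, h, pvMinL]

theorem pvMC_succ (a : List Int) (i k u : Nat) (h : i ≤ u) :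
    pvMC a i k (u + 1) = min (pvMC a i k u) (pvCand a i (u + 1) k) := by
  have h1 : u + 1 + 1 - i = (u + 1 - i) + 1 := by omega
  have h2 : i + (u + 1 - i) = u + 1 := by omega
  rw [pvMC, h1, List.range_succ, List.map_append, List.map_singleton, h2, pvMinL_append]
  have hne : (List.range (u + 1 - i)).map (fun t => pvCand a i (i + t) k) ≠ [] := by
    simp only [ne_eq, List.map_eq_nil_iff, List.range_eq_nil]
    omega
  rw [if_neg hne]
  rfl

theorem pvDrow_succ_eq_MC (a : List Int) (i k : Nat) :
    pvDrow a (i + 1) k = pvMC a (i + 1) k k := by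
  rw [pvDrow, pvMC]
  have hlen : k + 1 - (i + 1) = k - i := by omega
  rw [hlen]
  congr 1
  apply List.map_congr_left
  intro t _
  have e1 : i + 1 + t - 1 = i + t := by omega
  have e2 : i + 1 - 1 = i := by omega
  rw [pvCand, e1, e2]

theorem pv_getD_concat (xs : List Int) (x : Int) : (xs ++ [x]).getD xs.length 0 = x := by
  simp [List.getD_eq_getElem?_getD]

theorem pv_getD_append_lt (xs : List Int) (x : Int) (t : Nat) (h : t < xs.length) :
    (xs ++ [x]).getD t 0 = xs.getD t 0 := by
  simp [List.getD_eq_getElem?_getD, List.getElem?_append_left h]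

theorem pvPp_append_le (xs : List Int) (x : Int) (i : Nat) (h : i ≤ xs.length) :
    pvPp (xs ++ [x]) i = pvPp xs i := by
  unfold pvPp
  apply congrArg
  apply List.map_congr_left
  intro t ht
  rw [pv_getD_append_lt xs x t (by simp only [List.mem_range] at ht; omega)]

theorem pvQq_append_le (xs : List Int) (x : Int) (i : Nat) (h : i ≤ xs.length) :
    pvQq (xs ++ [x]) i = pvQq xs i := by
  unfold pvQq
  apply congrArg
  apply List.map_congr_left
  intro t ht
  rw [pv_getD_append_lt xs x t (by simp only [List.mem_range] at ht; omega)]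

theorem pvPQ_spec (a : List Int) :
    (PySem.List.enumerate a 0).foldl
      (fun (pq : List Int × List Int) tv =>
        (pq.1 ++ [PySem.List.pyGetD pq.1 (-1) 0 + tv.2],
         pq.2 ++ [PySem.List.pyGetD pq.2 (-1) 0 + tv.2 * (tv.1 + 1)]))
      ([0], [0])
    = ((List.range (a.length + 1)).map (fun i => pvPp a i),
       (List.range (a.length + 1)).map (fun i => pvQq a i)) := by
  induction a using List.reverseRecOn with
  | nil => simp [PySem.List.enumerate, pvPp, pvQq]
  | append_singleton xs x ih =>
    rw [PySem.List.enumerate_append, List.foldl_append, ih]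
    have hx : PySem.List.enumerate [x] (0 + (xs.length : Int)) = [((xs.length : Int), x)] := by
      simp [PySem.List.enumerate]
    rw [hx, List.foldl_cons, List.foldl_nil]
    dsimp only
    have hP : (List.range (xs.length + 1)).map (fun i => pvPp xs i)
        = (List.range xs.length).map (fun i => pvPp xs i) ++ [pvPp xs xs.length] := by
      rw [List.range_succ, List.map_append, List.map_singleton]
    have hQ : (List.range (xs.length + 1)).map (fun i => pvQq xs i)
        = (List.range xs.length).map (fun i => pvQq xs i) ++ [pvQq xs xs.length] := by
      rw [List.range_succ, List.map_append, List.map_singleton]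
    rw [Prod.mk.injEq]
    constructor
    · have hF : (List.range (xs.length + 1)).map (fun i => pvPp (xs ++ [x]) i)
          = (List.range (xs.length + 1)).map (fun i => pvPp xs i) := by
        apply List.map_congr_left
        intro t ht
        exact pvPp_append_le xs x t (by simp only [List.mem_range] at ht; omega)
      rw [hP, PySem.List.pyGetD_neg_one_append_singleton,
        show (xs ++ [x]).length + 1 = (xs.length + 1) + 1 by simp,
        List.range_succ, List.map_append, List.map_singleton, hF, hP]
      congr 1
      rw [pvPp_succ (xs ++ [x]) xs.length, pvPp_append_le xs x xs.length le_rfl,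
        pv_getD_concat]
    · have hF : (List.range (xs.length + 1)).map (fun i => pvQq (xs ++ [x]) i)
          = (List.range (xs.length + 1)).map (fun i => pvQq xs i) := by
        apply List.map_congr_left
        intro t ht
        exact pvQq_append_le xs x t (by simp only [List.mem_range] at ht; omega)
      rw [hQ, PySem.List.pyGetD_neg_one_append_singleton,
        show (xs ++ [x]).length + 1 = (xs.length + 1) + 1 by simp,
        List.range_succ, List.map_append, List.map_singleton, hF, hQ]
      congr 1
      rw [pvQq_succ (xs ++ [x]) xs.length, pvQq_append_le xs x xs.length le_rfl,
        pv_getD_concat]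

theorem pvMin?_getD (l : List Int) : (PySem.List.min? l (fun x => x)).getD 0 = pvMinL l := by
  cases l with
  | nil =>
    rw [(PySem.List.min?_eq_none_iff _ _).mpr rfl]
    rfl
  | cons c r => rw [PySem.List.min?_id_cons]; rfl

theorem pv_getD_map_range (f : Nat → Int) (m i : Nat) (h : i < m) :
    ((List.range m).map f).getD i 0 = f i := by
  rw [List.getD_eq_getElem?_getD, List.getElem?_map, List.getElem?_range h]
  rfl

theorem pvB_step (a : List Int) (SEG : Int → Int → Int)
    (hSEG : ∀ (j k : Nat), j ≤ k + 1 → k < a.length → SEG (j : Int) (k : Int) = pvSeg a j k)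
    (I : Nat) :
    pvAltRow a SEG ((List.range a.length).map (fun k => if I ≤ k then pvDrow a I k else 0))
      ((I + 1 : Nat) : Int)
    = (List.range a.length).map (fun k => if I + 1 ≤ k then pvDrow a (I + 1) k else 0) := by
  unfold pvAltRow
  rw [PySem.List.pyRange_one, List.map_map]
  simp only [Int.sub_zero, Int.toNat_natCast]
  apply List.map_congr_left
  intro t ht
  simp only [List.mem_range] at ht
  simp only [Function.comp_apply, zero_add]
  by_cases hc : I + 1 ≤ t
  · rw [if_pos (by exact_mod_cast hc), if_pos hc]
    rw [PySem.List.pyRange_one, List.map_map]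
    have hlen : (((t : Int) + 1 - ((I + 1 : Nat) : Int))).toNat = t - I := by
      push_cast; omega
    rw [hlen]
    have hmap : (List.range (t - I)).map
          ((fun j => PySem.List.pyGetD
              ((List.range a.length).map (fun k => if I ≤ k then pvDrow a I k else 0)) (j - 1) 0
            + SEG j (t : Int)) ∘ (fun (k : Nat) => ((I + 1 : Nat) : Int) + (k : Int)))
        = (List.range (t - I)).map (fun s => pvDrow a I (I + s) + pvSeg a (I + 1 + s) t) := by
      apply List.map_congr_left
      intro s hs
      simp only [List.mem_range] at hs
      simp only [Function.comp_apply]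
      have e1 : ((I + 1 : Nat) : Int) + (s : Int) - 1 = ((I + s : Nat) : Int) := by
        push_cast; ring
      have e2 : ((I + 1 : Nat) : Int) + (s : Int) = ((I + 1 + s : Nat) : Int) := by
        push_cast; ring
      rw [e1, e2, PySem.List.pyGetD_natCast,
        pv_getD_map_range _ _ _ (by omega : I + s < a.length),
        if_pos (by omega : I ≤ I + s),
        hSEG (I + 1 + s) t (by omega) ht]
    rw [hmap, pvMin?_getD]
    rfl
  · rw [if_neg (by exact_mod_cast hc), if_neg hc]

theorem pvB_fold (a : List Int) (SEG : Int → Int → Int)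
    (hSEG : ∀ (j k : Nat), j ≤ k + 1 → k < a.length → SEG (j : Int) (k : Int) = pvSeg a j k) :
    ∀ (I : Nat), I < a.length →
    (PySem.List.pyRange 1 ((I + 1 : Nat) : Int) 1).foldl (pvAltRow a SEG)
      ((PySem.List.pyRange 0 (a.length : Int) 1).map (fun k => SEG 0 k))
    = (List.range a.length).map (fun k => if I ≤ k then pvDrow a I k else 0) := by
  intro I
  induction I with
  | zero =>
    intro _
    rw [show (PySem.List.pyRange 1 ((0 + 1 : Nat) : Int) 1) = [] from
      PySem.List.pyRange_one_eq_nil (by norm_num), List.foldl_nil]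
    rw [PySem.List.pyRange_one, List.map_map]
    simp only [Int.sub_zero, Int.toNat_natCast]
    apply List.map_congr_left
    intro t ht
    simp only [List.mem_range] at ht
    simp only [Function.comp_apply, zero_add]
    rw [if_pos (Nat.zero_le t)]
    have h0 := hSEG 0 t (Nat.zero_le _) ht
    push_cast at h0
    rw [h0]
    rfl
  | succ I ih =>
    intro hIn
    have hI : I < a.length := by omega
    have hcast : ((I + 1 + 1 : Nat) : Int) = ((I + 1 : Nat) : Int) + 1 := by push_cast; ring
    rw [hcast, PySem.List.pyRange_one_succ_right (by push_cast; omega), List.foldl_append,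
      ih hI, List.foldl_cons, List.foldl_nil]
    exact pvB_step a SEG hSEG I

-- defeq images of the closures B's port builds (used to state the reduced goal)
def pvPQX (a : List Int) : List Int × List Int :=
  (PySem.List.enumerate a 0).foldl
    (fun (pq : List Int × List Int) tv =>
      (pq.1 ++ [PySem.List.pyGetD pq.1 (-1) 0 + tv.2],
       pq.2 ++ [PySem.List.pyGetD pq.2 (-1) 0 + tv.2 * (tv.1 + 1)]))
    ([0], [0])
def pvSegX (a : List Int) : Int → Int → Int := fun j k =>
  (PySem.List.pyGetD (pvPQX a).2 (k + 1) 0 - PySem.List.pyGetD (pvPQX a).2 j 0)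
    - j * (PySem.List.pyGetD (pvPQX a).1 (k + 1) 0 - PySem.List.pyGetD (pvPQX a).1 j 0)

theorem pvPQX_eq (a : List Int) :
    pvPQX a = ((List.range (a.length + 1)).map (fun i => pvPp a i),
               (List.range (a.length + 1)).map (fun i => pvQq a i)) := pvPQ_spec a

theorem pvSegX_eq (a : List Int) (j k : Nat) (hj : j ≤ k + 1) (hk : k < a.length) :
    pvSegX a (j : Int) (k : Int) = pvSeg a j k := by
  unfold pvSegX
  rw [pvPQX_eq]
  dsimp only
  have e : ((k : Int) + 1) = ((k + 1 : Nat) : Int) := by push_cast; ring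
  rw [e, PySem.List.pyGetD_natCast, PySem.List.pyGetD_natCast,
    PySem.List.pyGetD_natCast, PySem.List.pyGetD_natCast,
    pv_getD_map_range _ _ _ (by omega : k + 1 < a.length + 1),
    pv_getD_map_range _ _ _ (by omega : j < a.length + 1),
    pv_getD_map_range _ _ _ (by omega : k + 1 < a.length + 1),
    pv_getD_map_range _ _ _ (by omega : j < a.length + 1)]
  exact (pvSeg_eq_PQ a j k hj).symm

theorem pvB_final_red (a : List Int) (buttons : Int) (h2 : 2 ≤ buttons)
    (hbn : buttons ≤ (a.length : Int)) :
    PySem.List.pyGetD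
      ((PySem.List.pyRange 1 buttons 1).foldl (pvAltRow a (pvSegX a))
        ((PySem.List.pyRange 0 a.length 1).map (fun k => pvSegX a 0 k)))
      ((a.length : Int) - 1) 0 = pvDrow a (buttons.toNat - 1) (a.length - 1) := by
  have htn : (buttons.toNat : Int) = buttons := Int.toNat_of_nonneg (by omega)
  set I : Nat := buttons.toNat - 1 with hI
  have hIn : I < a.length := by omega
  have hbb : buttons = ((I + 1 : Nat) : Int) := by omega
  rw [hbb, pvB_fold a (pvSegX a) (fun j k hj hk => pvSegX_eq a j k hj hk) I hIn]
  rw [show ((a.length : Int) - 1) = ((a.length - 1 : Nat) : Int) by omega,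
    PySem.List.pyGetD_natCast,
    pv_getD_map_range _ _ _ (by omega : a.length - 1 < a.length),
    if_pos (by omega : I ≤ a.length - 1)]

theorem pvB_final (a : List Int) (buttons : Int) (h2 : 2 ≤ buttons)
    (hbn : buttons ≤ (a.length : Int)) :
    count_number_of_clicks_alt a buttons = pvDrow a (buttons.toNat - 1) (a.length - 1) := by
  have h1' : ¬ ((buttons == 1) = true) := by simp only [beq_iff_eq]; omega
  have h2' : ¬ (buttons > (a.length : Int)) := by omega
  unfold count_number_of_clicks_alt
  rw [if_neg h1', if_neg h2']
  exact pvB_final_red a buttons h2 hbn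

-- ---- A-side: Nat-indexed matrix access and the loop invariants ----

def pvMgN (m : List (List Int)) (i j : Nat) : Int := (m.getD i []).getD j 0
def pvMsN (m : List (List Int)) (i j : Nat) (v : Int) : List (List Int) :=
  m.set i ((m.getD i []).set j v)
def pvShape (m : List (List Int)) (R C : Nat) : Prop :=
  m.length = R ∧ ∀ i, i < R → (m.getD i []).length = C

theorem pvMget_cast (m : List (List Int)) (i j : Nat) :
    pvMget m (i : Int) (j : Int) = pvMgN m i j := by
  simp [pvMget, pvMgN, PySem.List.pyGetD_natCast]

theorem pvMset_cast (m : List (List Int)) (i j : Nat) (v : Int) :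
    pvMset m (i : Int) (j : Int) v = pvMsN m i j v := by
  simp [pvMset, pvMsN]

theorem pvMsN_row (m : List (List Int)) (i j : Nat) (v : Int) (i' : Nat) :
    (pvMsN m i j v).getD i' [] =
      if i' = i ∧ i < m.length then (m.getD i []).set j v else m.getD i' [] := by
  unfold pvMsN
  rw [List.getD_eq_getElem?_getD, List.getElem?_set]
  by_cases h1 : i = i'
  · subst h1
    by_cases h2 : i < m.length
    · simp [h2, List.getD_eq_getElem?_getD]
    · have hnone : m[i]? = none := List.getElem?_eq_none (by omega)
      simp [h2, List.getD_eq_getElem?_getD, hnone]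
  · simp [h1, Ne.symm h1, List.getD_eq_getElem?_getD]

theorem pv_getD_set (r : List Int) (j : Nat) (v : Int) (j' : Nat) :
    (r.set j v).getD j' 0 = if j = j' ∧ j < r.length then v else r.getD j' 0 := by
  rw [List.getD_eq_getElem?_getD, List.getElem?_set]
  by_cases h1 : j = j'
  · subst h1
    by_cases h2 : j < r.length
    · simp [h2]
    · have hnone : r[j]? = none := List.getElem?_eq_none (by omega)
      simp [h2, List.getD_eq_getElem?_getD, hnone]
  · simp [h1, List.getD_eq_getElem?_getD]

theorem pvMgN_msN (m : List (List Int)) (i j : Nat) (v : Int) (i' j' : Nat) :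
    pvMgN (pvMsN m i j v) i' j' =
      if i' = i ∧ i < m.length ∧ j = j' ∧ j < (m.getD i []).length then v
      else pvMgN m i' j' := by
  unfold pvMgN
  rw [pvMsN_row]
  by_cases h1 : i' = i ∧ i < m.length
  · rw [if_pos h1, pv_getD_set]
    by_cases h2 : j = j' ∧ j < (m.getD i []).length
    · rw [if_pos h2, if_pos ⟨h1.1, h1.2, h2⟩]
    · rw [if_neg h2, if_neg (by tauto), h1.1]
  · rw [if_neg h1, if_neg (by tauto)]

theorem pvShape_msN (m : List (List Int)) (R C : Nat) (hs : pvShape m R C)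
    (i j : Nat) (v : Int) : pvShape (pvMsN m i j v) R C := by
  obtain ⟨hl, hr⟩ := hs
  refine ⟨by simp [pvMsN, hl], ?_⟩
  intro i' hi'
  rw [pvMsN_row]
  by_cases h : i' = i ∧ i < m.length
  · rw [if_pos h, List.length_set]
    exact hr i (by omega)
  · rw [if_neg h]
    exact hr i' hi'

-- first inner loop: writes the single-split candidates base + seg(i, k) into row i
theorem pvA_loop1 (a : List Int) (B2 n maxL : Nat) (hn : n = a.length)
    (hmax : maxL = n - B2 + 1) (hB2 : 2 ≤ B2) (hBn : B2 ≤ n)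
    (i : Nat) (hiB : i < B2)
    (m : List (List Int)) (hs : pvShape m B2 n)
    (hprev : 1 ≤ i → pvMgN m (i - 1) (i - 1) = pvDrow a (i - 1) (i - 1)) :
    ∀ (J : Nat), i ≤ J → J ≤ i + maxL →
    pvShape ((PySem.List.pyRange (i : Int) (J : Int) 1).foldl (pvLoop1Body a (i : Int)) (m, 2)).1 B2 n ∧
    (∀ i' j', i' ≠ i →
      pvMgN ((PySem.List.pyRange (i : Int) (J : Int) 1).foldl (pvLoop1Body a (i : Int)) (m, 2)).1 i' j'
        = pvMgN m i' j') ∧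
    (∀ k, i ≤ k → k < J →
      pvMgN ((PySem.List.pyRange (i : Int) (J : Int) 1).foldl (pvLoop1Body a (i : Int)) (m, 2)).1 i k
        = (if i = 0 then 0 else pvDrow a (i - 1) (i - 1)) + pvSeg a i k) ∧
    (∀ k, k < i ∨ J ≤ k →
      pvMgN ((PySem.List.pyRange (i : Int) (J : Int) 1).foldl (pvLoop1Body a (i : Int)) (m, 2)).1 i k
        = pvMgN m i k) ∧
    ((PySem.List.pyRange (i : Int) (J : Int) 1).foldl (pvLoop1Body a (i : Int)) (m, 2)).2
      = ((max (J - i) 1 : Nat) : Int) + 1 := by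
  refine Nat.le_induction ?_ ?_
  · intro _
    rw [PySem.List.pyRange_one_eq_nil (le_refl ((i : Nat) : Int))]
    simp only [List.foldl_nil]
    refine ⟨hs, fun i' j' _ => by trivial, ?_, fun k _ => by trivial, ?_⟩
    · intro k hk1 hk2; omega
    · show (2 : Int) = ((max (i - i) 1 : Nat) : Int) + 1
      omega
  · intro J hJ ih hJ2
    have hJm : J ≤ i + maxL := by omega
    obtain ⟨ihs, ihother, ihrow, ihkeep, ihnoc⟩ := ih hJm
    have hpeel : PySem.List.pyRange ((i : Nat) : Int) (((J + 1 : Nat)) : Int) 1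
        = PySem.List.pyRange ((i : Nat) : Int) ((J : Nat) : Int) 1 ++ [((J : Nat) : Int)] := by
      rw [show (((J + 1 : Nat)) : Int) = ((J : Nat) : Int) + 1 by push_cast; ring]
      exact PySem.List.pyRange_one_succ_right (by exact_mod_cast hJ)
    rw [hpeel, List.foldl_append, List.foldl_cons, List.foldl_nil]
    set res := (PySem.List.pyRange ((i : Nat) : Int) ((J : Nat) : Int) 1).foldl
      (pvLoop1Body a ((i : Nat) : Int)) (m, 2) with hres
    have hlen1 : res.1.length = B2 := ihs.1
    have hrowlen : (res.1.getD i []).length = n := ihs.2 i hiB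
    have hJn : J < n := by omega
    unfold pvLoop1Body
    by_cases hJ0 : J = 0
    · have hi0 : i = 0 := by omega
      have hc : (((J : Nat) : Int) == 0) = true := by simp [hJ0]
      rw [if_pos hc, pvMset_cast]
      have hv : PySem.List.pyGetD a 0 0
          = (if i = 0 then 0 else pvDrow a (i - 1) (i - 1)) + pvSeg a i J := by
        rw [PySem.List.pyGetD_zero, if_pos hi0, hi0, hJ0, pvSeg_self, zero_add]
      refine ⟨pvShape_msN _ _ _ ihs i J _, ?_, ?_, ?_, ?_⟩
      · intro i' j' hne
        rw [pvMgN_msN, if_neg (by rintro ⟨h, -⟩; exact hne h)]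
        exact ihother i' j' hne
      · intro k hk1 hk3
        by_cases hkJ : k = J
        · subst hkJ
          rw [pvMgN_msN, if_pos ⟨rfl, by omega, rfl, by omega⟩, hv]
        · rw [pvMgN_msN, if_neg (by rintro ⟨-, -, hh, -⟩; omega)]
          exact ihrow k hk1 (by omega)
      · intro k hk
        rcases hk with hk | hk
        · rw [pvMgN_msN, if_neg (by rintro ⟨-, -, hh, -⟩; omega)]
          exact ihkeep k (Or.inl hk)
        · rw [pvMgN_msN, if_neg (by rintro ⟨-, -, hh, -⟩; omega)]
          exact ihkeep k (Or.inr (by omega))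
      · show res.2 = _
        rw [ihnoc]; omega
    · have hc : ¬ ((((J : Nat) : Int) == 0) = true) := by simp; omega
      rw [if_neg hc]
      by_cases hij : i = J
      · have hc2 : (((i : Nat) : Int) == ((J : Nat) : Int)) = true := by simp [hij]
        rw [if_pos hc2]
        have hi1 : 1 ≤ i := by omega
        have e1 : (((i : Nat) : Int) - 1) = ((i - 1 : Nat) : Int) := by omega
        have e2 : (((J : Nat) : Int) - 1) = ((J - 1 : Nat) : Int) := by omega
        rw [e1, e2, pvMget_cast, pvMset_cast, PySem.List.pyGetD_natCast]
        have hv : pvMgN res.1 (i - 1) (J - 1) + a.getD i 0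
            = (if i = 0 then 0 else pvDrow a (i - 1) (i - 1)) + pvSeg a i J := by
          rw [ihother (i - 1) (J - 1) (by omega), if_neg (by omega),
            show J - 1 = i - 1 from by omega, hprev hi1,
            show J = i from hij.symm, pvSeg_self]
        refine ⟨pvShape_msN _ _ _ ihs i J _, ?_, ?_, ?_, ?_⟩
        · intro i' j' hne
          rw [pvMgN_msN, if_neg (by rintro ⟨h, -⟩; exact hne h)]
          exact ihother i' j' hne
        · intro k hk1 hk3
          by_cases hkJ : k = J
          · subst hkJ
            rw [pvMgN_msN, if_pos ⟨rfl, by omega, rfl, by omega⟩, hv]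
          · rw [pvMgN_msN, if_neg (by rintro ⟨-, -, hh, -⟩; omega)]
            exact ihrow k hk1 (by omega)
        · intro k hk
          rcases hk with hk | hk
          · rw [pvMgN_msN, if_neg (by rintro ⟨-, -, hh, -⟩; omega)]
            exact ihkeep k (Or.inl hk)
          · rw [pvMgN_msN, if_neg (by rintro ⟨-, -, hh, -⟩; omega)]
            exact ihkeep k (Or.inr (by omega))
        · show res.2 = _
          rw [ihnoc]; omega
      · have hc2 : ¬ ((((i : Nat) : Int) == ((J : Nat) : Int)) = true) := by simp; omega
        rw [if_neg hc2]
        have hiJ : i < J := by omega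
        have e2 : (((J : Nat) : Int) - 1) = ((J - 1 : Nat) : Int) := by omega
        rw [e2, pvMget_cast, pvMset_cast, PySem.List.pyGetD_natCast]
        have hv : pvMgN res.1 i (J - 1) + res.2 * a.getD J 0
            = (if i = 0 then 0 else pvDrow a (i - 1) (i - 1)) + pvSeg a i J := by
          rw [ihrow (J - 1) (by omega) (by omega), ihnoc]
          have hseg : pvSeg a i J
              = pvSeg a i (J - 1) + (((J - i : Nat) : Int) + 1) * a.getD J 0 := by
            have h' := pvSeg_succ a i (J - 1) (by omega)
            rw [show J - 1 + 1 = J from by omega] at h'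
            exact h'
          rw [hseg, show ((max (J - i) 1 : Nat) : Int) = ((J - i : Nat) : Int) from by omega]
          ring
        refine ⟨pvShape_msN _ _ _ ihs i J _, ?_, ?_, ?_, ?_⟩
        · intro i' j' hne
          rw [pvMgN_msN, if_neg (by rintro ⟨h, -⟩; exact hne h)]
          exact ihother i' j' hne
        · intro k hk1 hk3
          by_cases hkJ : k = J
          · subst hkJ
            rw [pvMgN_msN, if_pos ⟨rfl, by omega, rfl, by omega⟩, hv]
          · rw [pvMgN_msN, if_neg (by rintro ⟨-, -, hh, -⟩; omega)]
            exact ihrow k hk1 (by omega)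
        · intro k hk
          rcases hk with hk | hk
          · rw [pvMgN_msN, if_neg (by rintro ⟨-, -, hh, -⟩; omega)]
            exact ihkeep k (Or.inl hk)
          · rw [pvMgN_msN, if_neg (by rintro ⟨-, -, hh, -⟩; omega)]
            exact ihkeep k (Or.inr (by omega))
        · show res.2 + 1 = _
          rw [ihnoc]; omega

-- innermost loop: running candidate number = num0 + seg(j, k), min-folded into row i
theorem pvA_loop3 (a : List Int) (B2 n maxL : Nat) (hn : n = a.length)
    (hmax : maxL = n - B2 + 1) (hB2 : 2 ≤ B2) (hBn : B2 ≤ n)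
    (i : Nat) (hi1 : 1 ≤ i) (hiB : i < B2)
    (j : Nat) (hj : i + 1 ≤ j)
    (m : List (List Int)) (hs : pvShape m B2 n) (num0 : Int) :
    ∀ (K : Nat), j ≤ K → K ≤ i + maxL →
    pvShape ((PySem.List.pyRange (j : Int) (K : Int) 1).foldl (pvLoop3Body a (i : Int)) (m, 1, num0)).1 B2 n ∧
    (∀ i' j', i' ≠ i →
      pvMgN ((PySem.List.pyRange (j : Int) (K : Int) 1).foldl (pvLoop3Body a (i : Int)) (m, 1, num0)).1 i' j'
        = pvMgN m i' j') ∧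
    (∀ k, j ≤ k → k < K →
      pvMgN ((PySem.List.pyRange (j : Int) (K : Int) 1).foldl (pvLoop3Body a (i : Int)) (m, 1, num0)).1 i k
        = min (pvMgN m i k) (num0 + pvSeg a j k)) ∧
    (∀ k, k < j ∨ K ≤ k →
      pvMgN ((PySem.List.pyRange (j : Int) (K : Int) 1).foldl (pvLoop3Body a (i : Int)) (m, 1, num0)).1 i k
        = pvMgN m i k) ∧
    ((PySem.List.pyRange (j : Int) (K : Int) 1).foldl (pvLoop3Body a (i : Int)) (m, 1, num0)).2.1
      = ((K - j : Nat) : Int) + 1 ∧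
    ((PySem.List.pyRange (j : Int) (K : Int) 1).foldl (pvLoop3Body a (i : Int)) (m, 1, num0)).2.2
      = num0 + pvSeg a j (K - 1) := by
  refine Nat.le_induction ?_ ?_
  · intro _
    rw [PySem.List.pyRange_one_eq_nil (le_refl ((j : Nat) : Int))]
    simp only [List.foldl_nil]
    refine ⟨hs, fun i' j' _ => by trivial, ?_, fun k _ => by trivial, ?_, ?_⟩
    · intro k hk1 hk2; omega
    · show (1 : Int) = ((j - j : Nat) : Int) + 1
      omega
    · show num0 = num0 + pvSeg a j (j - 1)
      rw [pvSeg_nil a j (j - 1) (by omega)]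
      ring
  · intro K hK ih hK2
    have hKm : K ≤ i + maxL := by omega
    obtain ⟨ihs, ihother, ihmin, ihkeep, ihnoc, ihnum⟩ := ih hKm
    have hpeel : PySem.List.pyRange ((j : Nat) : Int) (((K + 1 : Nat)) : Int) 1
        = PySem.List.pyRange ((j : Nat) : Int) ((K : Nat) : Int) 1 ++ [((K : Nat) : Int)] := by
      rw [show (((K + 1 : Nat)) : Int) = ((K : Nat) : Int) + 1 by push_cast; ring]
      exact PySem.List.pyRange_one_succ_right (by exact_mod_cast hK)
    rw [hpeel, List.foldl_append, List.foldl_cons, List.foldl_nil]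
    set res := (PySem.List.pyRange ((j : Nat) : Int) ((K : Nat) : Int) 1).foldl
      (pvLoop3Body a ((i : Nat) : Int)) (m, 1, num0) with hres
    have hlen1 : res.1.length = B2 := ihs.1
    have hrowlen : (res.1.getD i []).length = n := ihs.2 i hiB
    have hKn : K < n := by omega
    unfold pvLoop3Body
    rw [PySem.List.pyGetD_natCast, pvMget_cast]
    have hnum' : res.2.2 + res.2.1 * a.getD K 0 = num0 + pvSeg a j K := by
      rw [ihnum, ihnoc]
      have hseg : pvSeg a j K
          = pvSeg a j (K - 1) + (((K - j : Nat) : Int) + 1) * a.getD K 0 := by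
        have h' := pvSeg_succ a j (K - 1) (by omega)
        rw [show K - 1 + 1 = K from by omega] at h'
        exact h'
      rw [hseg]
      ring
    have hcur : pvMgN res.1 i K = pvMgN m i K := ihkeep K (Or.inr le_rfl)
    by_cases hlt : res.2.2 + res.2.1 * a.getD K 0 < pvMgN res.1 i K
    · rw [if_pos hlt]
      dsimp only
      rw [pvMset_cast]
      refine ⟨pvShape_msN _ _ _ ihs i K _, ?_, ?_, ?_, ?_, ?_⟩
      · intro i' j' hne
        rw [pvMgN_msN, if_neg (by rintro ⟨h, -⟩; exact hne h)]
        exact ihother i' j' hne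
      · intro k hk1 hk3
        by_cases hkK : k = K
        · subst hkK
          rw [pvMgN_msN, if_pos ⟨rfl, by omega, rfl, by omega⟩, hnum']
          rw [hnum', hcur] at hlt
          omega
        · rw [pvMgN_msN, if_neg (by rintro ⟨-, -, hh, -⟩; omega)]
          exact ihmin k hk1 (by omega)
      · intro k hk
        rcases hk with hk | hk
        · rw [pvMgN_msN, if_neg (by rintro ⟨-, -, hh, -⟩; omega)]
          exact ihkeep k (Or.inl hk)
        · rw [pvMgN_msN, if_neg (by rintro ⟨-, -, hh, -⟩; omega)]
          exact ihkeep k (Or.inr (by omega))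
      · show res.2.1 + 1 = _
        rw [ihnoc]; omega
      · show res.2.2 + res.2.1 * a.getD K 0 = _
        rw [hnum', show K + 1 - 1 = K from by omega]
    · rw [if_neg hlt]
      dsimp only
      refine ⟨ihs, fun i' j' hne => ihother i' j' hne, ?_, ?_, ?_, ?_⟩
      · intro k hk1 hk3
        by_cases hkK : k = K
        · subst hkK
          rw [hcur]
          rw [hnum', hcur] at hlt
          omega
        · exact ihmin k hk1 (by omega)
      · intro k hk
        rcases hk with hk | hk
        · exact ihkeep k (Or.inl hk)
        · exact ihkeep k (Or.inr (by omega))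
      · show res.2.1 + 1 = _
        rw [ihnoc]; omega
      · show res.2.2 + res.2.1 * a.getD K 0 = _
        rw [hnum', show K + 1 - 1 = K from by omega]

-- second loop: row i becomes the running minimum over split points up to J - 1
theorem pvA_loop2 (a : List Int) (B2 n maxL : Nat) (hn : n = a.length)
    (hmax : maxL = n - B2 + 1) (hB2 : 2 ≤ B2) (hBn : B2 ≤ n)
    (i : Nat) (hi1 : 1 ≤ i) (hiB : i < B2)
    (m : List (List Int)) (hs : pvShape m B2 n)
    (hprevrow : ∀ k, i - 1 ≤ k → k < i - 1 + maxL → pvMgN m (i - 1) k = pvDrow a (i - 1) k)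
    (hrowi : ∀ k, i ≤ k → k < i + maxL → pvMgN m i k = pvCand a i i k) :
    ∀ (J : Nat), i + 1 ≤ J → J ≤ i + maxL →
    pvShape ((PySem.List.pyRange ((i : Int) + 1) (J : Int) 1).foldl (pvLoop2Body a (i : Int) ((maxL : Nat) : Int)) m) B2 n ∧
    (∀ i' j', i' ≠ i →
      pvMgN ((PySem.List.pyRange ((i : Int) + 1) (J : Int) 1).foldl (pvLoop2Body a (i : Int) ((maxL : Nat) : Int)) m) i' j'
        = pvMgN m i' j') ∧
    (∀ k, i ≤ k → k < i + maxL →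
      pvMgN ((PySem.List.pyRange ((i : Int) + 1) (J : Int) 1).foldl (pvLoop2Body a (i : Int) ((maxL : Nat) : Int)) m) i k
        = pvMC a i k (min (J - 1) k)) := by
  refine Nat.le_induction ?_ ?_
  · intro _
    rw [show ((i : Nat) : Int) + 1 = (((i + 1 : Nat)) : Int) by push_cast; ring,
      PySem.List.pyRange_one_eq_nil (le_refl (((i + 1 : Nat)) : Int))]
    simp only [List.foldl_nil]
    refine ⟨hs, fun i' j' _ => by trivial, ?_⟩
    intro k hk1 hk2
    rw [hrowi k hk1 hk2, show min (i + 1 - 1) k = i from by omega, pvMC_base]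
  · intro J hJ ih hJ2
    have hJm : J ≤ i + maxL := by omega
    obtain ⟨ihs, ihother, ihrow⟩ := ih hJm
    have hpeel : PySem.List.pyRange (((i : Nat) : Int) + 1) (((J + 1 : Nat)) : Int) 1
        = PySem.List.pyRange (((i : Nat) : Int) + 1) ((J : Nat) : Int) 1 ++ [((J : Nat) : Int)] := by
      rw [show (((J + 1 : Nat)) : Int) = ((J : Nat) : Int) + 1 by push_cast; ring]
      exact PySem.List.pyRange_one_succ_right (by push_cast; omega)
    rw [hpeel, List.foldl_append, List.foldl_cons, List.foldl_nil]
    set res := (PySem.List.pyRange (((i : Nat) : Int) + 1) ((J : Nat) : Int) 1).foldl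
      (pvLoop2Body a ((i : Nat) : Int) ((maxL : Nat) : Int)) m with hres
    unfold pvLoop2Body
    have ecast : ((i : Nat) : Int) + ((maxL : Nat) : Int) = (((i + maxL : Nat)) : Int) := by
      push_cast; ring
    have e1 : (((i : Nat) : Int) - 1) = ((i - 1 : Nat) : Int) := by omega
    have e2 : (((J : Nat) : Int) - 1) = ((J - 1 : Nat) : Int) := by omega
    rw [ecast, e1, e2, pvMget_cast]
    have hnum0 : pvMgN res (i - 1) (J - 1) = pvDrow a (i - 1) (J - 1) := by
      rw [ihother (i - 1) (J - 1) (by omega)]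
      exact hprevrow (J - 1) (by omega) (by omega)
    obtain ⟨l3s, l3other, l3min, l3keep, -, -⟩ :=
      pvA_loop3 a B2 n maxL hn hmax hB2 hBn i hi1 hiB J hJ res ihs
        (pvMgN res (i - 1) (J - 1)) (i + maxL) (by omega) le_rfl
    refine ⟨l3s, ?_, ?_⟩
    · intro i' j' hne
      rw [l3other i' j' hne]
      exact ihother i' j' hne
    · intro k hk1 hk2
      by_cases hkJ : k < J
      · rw [l3keep k (Or.inl hkJ), ihrow k hk1 hk2,
          show min (J - 1) k = min (J + 1 - 1) k from by omega]
      · rw [l3min k (by omega) hk2, ihrow k hk1 hk2, hnum0,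
          show min (J - 1) k = J - 1 from by omega,
          show pvDrow a (i - 1) (J - 1) + pvSeg a J k = pvCand a i J k from rfl]
        have hMC := pvMC_succ a i k (J - 1) (by omega)
        rw [show J - 1 + 1 = J from by omega] at hMC
        rw [← hMC, show min (J + 1 - 1) k = J from by omega]

-- outer loop: after processing rows 0..I-1, each finished row holds the DP values
theorem pvA_outer (a : List Int) (B2 n maxL : Nat) (hn : n = a.length)
    (hmax : maxL = n - B2 + 1) (hB2 : 2 ≤ B2) (hBn : B2 ≤ n)
    (m0 : List (List Int)) (hs0 : pvShape m0 B2 n) :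
    ∀ (I : Nat), I ≤ B2 →
    pvShape ((PySem.List.pyRange 0 (I : Int) 1).foldl (pvRowBody a ((maxL : Nat) : Int)) m0) B2 n ∧
    (∀ i', i' < I → ∀ k, i' ≤ k → k < i' + maxL →
      pvMgN ((PySem.List.pyRange 0 (I : Int) 1).foldl (pvRowBody a ((maxL : Nat) : Int)) m0) i' k
        = pvDrow a i' k) := by
  intro I
  induction I with
  | zero =>
    intro _
    rw [show ((0 : Nat) : Int) = (0 : Int) by norm_num,
      PySem.List.pyRange_one_eq_nil le_rfl]
    simp only [List.foldl_nil]
    exact ⟨hs0, fun i' hi' => by omega⟩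
  | succ I ih =>
    intro hI1
    obtain ⟨ihs, ihrows⟩ := ih (by omega)
    have hpeel : PySem.List.pyRange 0 (((I + 1 : Nat)) : Int) 1
        = PySem.List.pyRange 0 ((I : Nat) : Int) 1 ++ [((I : Nat) : Int)] := by
      rw [show (((I + 1 : Nat)) : Int) = ((I : Nat) : Int) + 1 by push_cast; ring]
      exact PySem.List.pyRange_one_succ_right (by exact_mod_cast Nat.zero_le I)
    rw [hpeel, List.foldl_append, List.foldl_cons, List.foldl_nil]
    set res := (PySem.List.pyRange 0 ((I : Nat) : Int) 1).foldl
      (pvRowBody a ((maxL : Nat) : Int)) m0 with hres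
    have hmax1 : 1 ≤ maxL := by omega
    unfold pvRowBody
    have ecast : ((I : Nat) : Int) + ((maxL : Nat) : Int) = (((I + maxL : Nat)) : Int) := by
      push_cast; ring
    rw [ecast]
    have hprev : 1 ≤ I → pvMgN res (I - 1) (I - 1) = pvDrow a (I - 1) (I - 1) :=
      fun h1 => ihrows (I - 1) (by omega) (I - 1) le_rfl (by omega)
    obtain ⟨l1s, l1other, l1row, l1keep, -⟩ :=
      pvA_loop1 a B2 n maxL hn hmax hB2 hBn I (by omega) res ihs hprev
        (I + maxL) (by omega) le_rfl
    by_cases hI0 : I = 0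
    · have hc : ¬ ((((I : Nat) : Int) != 0) = true) := by simp [hI0]
      rw [if_neg hc]
      refine ⟨l1s, ?_⟩
      intro i' hi' k hk1 hk2
      have hii : i' = I := by omega
      rw [hii] at hk1 hk2 ⊢
      rw [l1row k hk1 (by omega), if_pos hI0, hI0, zero_add]
      rfl
    · have hc : ((((I : Nat) : Int) != 0) = true) := by simp; omega
      rw [if_pos hc]
      obtain ⟨l2s, l2other, l2row⟩ :=
        pvA_loop2 a B2 n maxL hn hmax hB2 hBn I (by omega) (by omega)
          ((PySem.List.pyRange ((I : Nat) : Int) (((I + maxL : Nat)) : Int) 1).foldl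
            (pvLoop1Body a ((I : Nat) : Int)) (res, 2)).1 l1s
          (fun k hk1 hk2 => by
            rw [l1other (I - 1) k (by omega)]
            exact ihrows (I - 1) (by omega) k hk1 hk2)
          (fun k hk1 hk2 => by
            rw [l1row k hk1 hk2, if_neg hI0]
            rfl)
          (I + maxL) (by omega) le_rfl
      refine ⟨l2s, ?_⟩
      intro i' hi' k hk1 hk2
      by_cases hii : i' = I
      · rw [hii] at hk1 hk2 ⊢
        rw [l2row k hk1 hk2, show min (I + maxL - 1) k = k from by omega]
        have hD := pvDrow_succ_eq_MC a (I - 1) k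
        rw [show I - 1 + 1 = I from by omega] at hD
        exact hD.symm
      · rw [l2other i' k hii, l1other i' k hii]
        exact ihrows i' (by omega) k hk1 hk2

theorem pvMget_last (m : List (List Int)) (R C : Nat) (hs : pvShape m R C)
    (hR : 1 ≤ R) (hC : 1 ≤ C) : pvMget m (-1) (-1) = pvMgN m (R - 1) (C - 1) := by
  have hlm : m.length = R := hs.1
  have hrl : (m.getD (R - 1) []).length = C := hs.2 (R - 1) (by omega)
  have hne : m ≠ [] := List.ne_nil_of_length_pos (by omega)
  unfold pvMget pvMgN
  rw [PySem.List.pyGetD_neg_one m [] hne]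
  have hrow : m.getLast hne = m.getD (R - 1) [] := by
    rw [List.getLast_eq_getElem, List.getD_eq_getElem?_getD,
      List.getElem?_eq_getElem (by omega : R - 1 < m.length)]
    simp [hlm]
  rw [hrow]
  have hrne : m.getD (R - 1) [] ≠ [] := List.ne_nil_of_length_pos (by omega)
  rw [PySem.List.pyGetD_neg_one _ 0 hrne]
  rw [List.getLast_eq_getElem]
  simp only [hrl]
  exact (List.getD_eq_getElem _ _ (by omega : C - 1 < (m.getD (R - 1) []).length)).symm

theorem pvShape_m0 (n : Nat) (B2 : Nat) :
    pvShape ((PySem.List.pyRange 0 ((B2 : Nat) : Int) 1).map (fun _ => List.replicate n 0)) B2 n := by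
  constructor
  · simp [PySem.List.length_pyRange_one]
  · intro i hi
    have hi' : i < (PySem.List.pyRange 0 ((B2 : Nat) : Int) 1).length := by
      simp only [PySem.List.length_pyRange_one]
      omega
    rw [List.getD_eq_getElem?_getD, List.getElem?_map, List.getElem?_eq_getElem hi']
    simp

theorem pvA_final (a : List Int) (buttons : Int) (h2 : 2 ≤ buttons)
    (hbn : buttons ≤ (a.length : Int)) :
    count_number_of_clicks a buttons = pvDrow a (buttons.toNat - 1) (a.length - 1) := by
  have h1' : ¬ ((buttons == 1) = true) := by simp only [beq_iff_eq]; omega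
  have h2' : ¬ (buttons > (a.length : Int)) := by omega
  have htn : (buttons.toNat : Int) = buttons := Int.toNat_of_nonneg (by omega)
  unfold count_number_of_clicks
  rw [if_neg h1', if_neg h2']
  dsimp only
  set B2 : Nat := buttons.toNat with hB2def
  have hB2 : 2 ≤ B2 := by omega
  have hBn : B2 ≤ a.length := by omega
  set n : Nat := a.length with hndef
  set maxL : Nat := n - B2 + 1 with hmaxdef
  have hbb : buttons = ((B2 : Nat) : Int) := by omega
  have hmaxI : (n : Int) - ((B2 : Nat) : Int) + 1 = ((maxL : Nat) : Int) := by omega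
  rw [hbb, hmaxI]
  simp only [List.length_map, PySem.List.length_pyRange_one, Int.sub_zero,
    Int.toNat_natCast]
  have hout := pvA_outer a B2 n maxL rfl rfl hB2 hBn _ (pvShape_m0 n B2) B2 le_rfl
  rw [pvMget_last _ B2 n hout.1 (by omega) (by omega)]
  exact hout.2 (B2 - 1) (by omega) (n - 1) (by omega) (by omega)

-- ---- the two easy branches and the verdict ----

theorem pv_branch1 (a : List Int) :
    count_number_of_clicks a 1 = count_number_of_clicks_alt a 1 := by
  unfold count_number_of_clicks count_number_of_clicks_alt
  rw [if_pos (by decide), if_pos (by decide)]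
  rw [PySem.List.foldl_add]
  rw [PySem.List.enumerate_eq_map_pyRange a 0, List.map_map]
  simp only [zero_add, PySem.List.len_eq]
  rfl

-- ===== VERDICT (by name: the statement is the Claim_ definition above) =====
theorem count_number_of_clicks_spec : Claim_equal_count_number_of_clicks := by
  intro a buttons _hDom hPre
  unfold Pre_count_number_of_clicks at hPre
  unfold Spec_count_number_of_clicks
  by_cases h1 : buttons = 1
  · subst h1
    exact pv_branch1 a
  · by_cases hgt : buttons > (a.length : Int)
    · have hb1 : ¬ ((buttons == 1) = true) := by simp only [beq_iff_eq]; omega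
      unfold count_number_of_clicks count_number_of_clicks_alt
      rw [if_neg hb1, if_pos hgt, if_neg hb1, if_pos hgt]
    · have h2 : 2 ≤ buttons := by omega
      have hbn : buttons ≤ (a.length : Int) := by omega
      rw [pvA_final a buttons h2 hbn, pvB_final a buttons h2 hbn]
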